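-- pv_equiv track=rewrite | github.com/Dimaaap/Leetcode | Easy/3582.) Generate Tag for Video Capture.py | generate_tag
-- ===== SOURCE A (Python) =====
-- from string import ascii_lowercase
--
-- def generate_tag(caption: str) -> str:
--     """
--     You are given a string caption representing the caption for a video.
--     The following actions must be performed in order to generate a valid tag for the video:
--         Combine all words in the string into a single camelCase string prefixed with '#'. A camelCase string is one
--         where the first letter of all words except the first one is capitalized. All characters after the first
--         character in each word must be lowercase.
--         Remove all characters that are not an English letter, except the first '#'
--         Truncate the result to a maximum of 100 characters.
--
--     Return the tag after performing the actions on caption.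
--     """
--     letters = ascii_lowercase
--     caption = caption.split()
--     tag = ""
--     for index, word in enumerate(caption):
--         if index == 0:
--             tag += word.lower()
--         else:
--             tag += word.capitalize()
--     tag = "".join([char for char in tag if char.lower() in letters])
--     return ("#" + tag)[:100]
-- ===== SOURCE B (Python) =====
-- def generate_tag(caption: str) -> str:
--     # Single left-to-right pass over the raw characters: no intermediate word
--     # lists, no join. 'seen' = some word already started earlier; 'at_start' =
--     # next non-space char begins a word.
--     out = []
--     seen = False
--     at_start = True
--     for ch in caption:
--         if ch.isspace():
--             at_start = True
--             continue
--         if at_start: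
--             c = ch.upper() if seen else ch.lower()
--         else:
--             c = ch.lower()
--         seen = True
--         at_start = False
--         if c.isascii() and c.isalpha():
--             out.append(c)
--     return ('#' + ''.join(out))[:100]
-- ===== Notes on version B (the rewrite author's own statement) =====
-- stated objective: alternative
-- what changed: Replaces A's split-into-words + per-word lower/capitalize + join + filter pipeline with a single left-to-right pass over the raw characters that tracks word boundaries with two booleans and never builds intermediate word lists or strings.
import Mathlib
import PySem

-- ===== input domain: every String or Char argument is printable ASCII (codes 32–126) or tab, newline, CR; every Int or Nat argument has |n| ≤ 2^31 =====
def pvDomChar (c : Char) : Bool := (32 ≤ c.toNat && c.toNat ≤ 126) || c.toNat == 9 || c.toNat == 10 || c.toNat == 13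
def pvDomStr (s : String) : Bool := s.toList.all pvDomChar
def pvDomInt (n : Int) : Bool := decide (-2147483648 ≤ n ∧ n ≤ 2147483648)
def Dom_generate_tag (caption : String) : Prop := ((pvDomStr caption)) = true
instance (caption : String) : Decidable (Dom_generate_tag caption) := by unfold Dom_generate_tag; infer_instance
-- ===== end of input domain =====

-- B replaces A's split + per-word transform + join + filter pipeline with ONE pass
-- over the raw characters, tracking word starts with two booleans (no word lists built).

-- ===== PORT A =====

-- word.capitalize(): first char uppercased, rest lowercased (exact for ASCII words).
def pvCap : List Char → List Char
  | [] => []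
  | c :: rest => PySem.Chars.upperChar c :: PySem.Chars.lower rest

-- "for index, word in enumerate(caption): tag += …" as an index-carrying loop.
def pvTagLoop : Nat → List (List Char) → List Char → List Char
  | _, [], tag => tag
  | i, w :: ws, tag =>
      pvTagLoop (i + 1) ws (tag ++ (if i == 0 then PySem.Chars.lower w else pvCap w))

def generate_tag (caption : String) : String :=
  let letters := "abcdefghijklmnopqrstuvwxyz".toList   -- ascii_lowercase
  let words := PySem.Chars.split₀ caption.toList       -- caption.split()
  let tag := pvTagLoop 0 words []
  -- "".join([char for char in tag if char.lower() in letters]): a one-char 'in' is membership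
  let tag := tag.filter (fun c => letters.contains (PySem.Chars.lowerChar c))
  String.ofList (PySem.List.slice ('#' :: tag) none (some 100))   -- ("#" + tag)[:100]

-- ===== PORT B =====

-- the single pass: seen = a word started earlier, atStart = next char begins a word;
-- appending to 'out' becomes consing the kept char onto the recursion's result.
-- (PySem.Chars.isalpha is ASCII-only, i.e. exactly Source B's 'c.isascii() and c.isalpha()'.)
def pvAltLoop : Bool → Bool → List Char → List Char
  | _, _, [] => []
  | seen, atStart, c :: rest =>
      if PySem.Chars.isspace c then pvAltLoop seen true rest
      else
        let c' := if atStart then (if seen then PySem.Chars.upperChar c else PySem.Chars.lowerChar c)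
                  else PySem.Chars.lowerChar c
        if PySem.Chars.isalpha c' then c' :: pvAltLoop true false rest
        else pvAltLoop true false rest

def generate_tag_alt (caption : String) : String :=
  String.ofList (PySem.List.slice ('#' :: pvAltLoop false true caption.toList) none (some 100))

-- ===== PRECONDITION & SPEC =====
def Spec_generate_tag (caption : String) (out : String) : Prop := out = generate_tag_alt caption
instance (caption : String) (out : String) : Decidable (Spec_generate_tag caption out) := by unfold Spec_generate_tag; infer_instance

-- ===== CLAIM (what is proved, stated in full; the proofs are below) =====
def Claim_equal_generate_tag : Prop := ∀ (caption : String), Dom_generate_tag caption → Spec_generate_tag caption (generate_tag caption)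

-- ===== LEMMAS AND PROOFS =====

-- abbreviations used only in proofs
def pvCapF (w : List Char) : List Char := (pvCap w).filter PySem.Chars.isalpha
def pvS (seen : Bool) (ws : List (List Char)) : List Char :=
  match ws with
  | [] => []
  | w :: rest =>
      (if seen then pvCapF w else (PySem.Chars.lower w).filter PySem.Chars.isalpha)
        ++ rest.flatMap pvCapF

theorem go_acc (cs : List Char) : ∀ cur acc, PySem.Chars.split₀.go cs cur acc
    = acc.reverse ++ PySem.Chars.split₀.go cs cur [] := by
  induction cs with
  | nil =>
    intro cur acc
    by_cases h : cur.isEmpty = true <;> simp [PySem.Chars.split₀.go, h]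
  | cons c rest ih =>
    intro cur acc
    by_cases hs : PySem.Chars.isspace c = true
    · by_cases h : cur.isEmpty = true
      · simp only [PySem.Chars.split₀.go, hs, h, if_pos]
        exact ih [] acc
      · simp only [PySem.Chars.split₀.go, hs, h, if_pos, if_neg, Bool.false_eq_true]
        rw [ih [] (cur.reverse :: acc), ih [] [cur.reverse]]
        simp
    · simp only [PySem.Chars.split₀.go, hs, Bool.false_eq_true, if_neg]
      exact ih (c :: cur) acc

theorem go_cur (cs : List Char) : ∀ cur, cur ≠ [] → PySem.Chars.split₀.go cs cur []
    = (cur.reverse ++ cs.takeWhile (fun c => !PySem.Chars.isspace c))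
        :: PySem.Chars.split₀ (cs.dropWhile (fun c => !PySem.Chars.isspace c)) := by
  induction cs with
  | nil =>
    intro cur hc
    simp [PySem.Chars.split₀.go, PySem.Chars.split₀, List.isEmpty_iff, hc]
  | cons c rest ih =>
    intro cur hc
    by_cases hs : PySem.Chars.isspace c = true
    · simp only [PySem.Chars.split₀.go, hs, if_pos, List.isEmpty_iff]
      rw [if_neg hc, go_acc]
      simp [PySem.Chars.split₀, PySem.Chars.split₀.go, List.takeWhile, List.dropWhile, hs]
    · simp only [PySem.Chars.split₀.go, hs, Bool.false_eq_true, if_neg]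
      rw [ih (c :: cur) (by simp)]
      simp [List.takeWhile, List.dropWhile, hs]

theorem split0_cons (c : Char) (cs : List Char) :
    PySem.Chars.split₀ (c :: cs)
      = if PySem.Chars.isspace c then PySem.Chars.split₀ cs
        else (c :: cs.takeWhile (fun c => !PySem.Chars.isspace c))
              :: PySem.Chars.split₀ (cs.dropWhile (fun c => !PySem.Chars.isspace c)) := by
  by_cases hs : PySem.Chars.isspace c = true
  · simp [PySem.Chars.split₀, PySem.Chars.split₀.go, hs]
  · simp only [PySem.Chars.split₀, PySem.Chars.split₀.go, hs, Bool.false_eq_true, if_neg]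
    rw [go_cur cs [c] (by simp)]
    simp [hs, PySem.Chars.split₀]

theorem tagLoop_shift (ws : List (List Char)) : ∀ i t, pvTagLoop (i + 1) ws t
    = t ++ ws.flatMap pvCap := by
  induction ws with
  | nil => intro i t; simp [pvTagLoop]
  | cons w ws ih =>
    intro i t
    simp only [pvTagLoop, show (i + 1 == 0) = false by simp, Bool.false_eq_true, if_neg]
    rw [ih (i + 1)]
    simp

theorem pvS_true (ws : List (List Char)) : pvS true ws = ws.flatMap pvCapF := by
  cases ws <;> simp [pvS]

theorem altLoop_mid (cs : List Char) : pvAltLoop true false cs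
    = ((PySem.Chars.lower (cs.takeWhile (fun c => !PySem.Chars.isspace c))).filter PySem.Chars.isalpha)
        ++ pvAltLoop true true (cs.dropWhile (fun c => !PySem.Chars.isspace c)) := by
  induction cs with
  | nil => simp [pvAltLoop, PySem.Chars.lower]
  | cons c rest ih =>
    by_cases hs : PySem.Chars.isspace c = true
    · simp [pvAltLoop, hs, List.takeWhile, List.dropWhile, PySem.Chars.lower]
    · simp only [pvAltLoop, hs, Bool.false_eq_true, if_neg, List.takeWhile, List.dropWhile,
        Bool.not_eq_eq_eq_not, Bool.not_true, if_pos]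
      rw [ih]
      by_cases ha : PySem.Chars.isalpha (PySem.Chars.lowerChar c) = true <;>
        simp [ha, PySem.Chars.lower]

theorem altLoop_split : ∀ n cs, cs.length ≤ n → ∀ seen,
    pvAltLoop seen true cs = pvS seen (PySem.Chars.split₀ cs) := by
  intro n
  induction n with
  | zero =>
    intro cs h seen
    have : cs = [] := List.eq_nil_of_length_eq_zero (Nat.le_zero.mp h)
    subst this
    simp [pvAltLoop, PySem.Chars.split₀, PySem.Chars.split₀.go, pvS]
  | succ n ih =>
    intro cs h seen
    match cs with
    | [] => simp [pvAltLoop, PySem.Chars.split₀, PySem.Chars.split₀.go, pvS]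
    | c :: rest =>
      by_cases hs : PySem.Chars.isspace c = true
      · simp only [pvAltLoop, hs, if_pos, split0_cons]
        exact ih rest (by simpa using Nat.le_of_succ_le_succ h) seen
      · have hd := ih (rest.dropWhile (fun c => !PySem.Chars.isspace c))
          (le_trans (List.length_dropWhile_le _ _) (by simpa using Nat.le_of_succ_le_succ h)) true
        rw [pvS_true] at hd
        simp only [pvAltLoop, hs, Bool.false_eq_true, if_neg, split0_cons]
        rw [altLoop_mid, hd]
        cases seen
        · simp only [if_neg, Bool.false_eq_true, pvS, PySem.Chars.lower, List.map_cons,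
            List.filter_cons]
          by_cases ha : PySem.Chars.isalpha (PySem.Chars.lowerChar c) = true <;>
            simp [ha, PySem.Chars.lower]
        · simp only [if_pos, pvS, pvCapF, pvCap, PySem.Chars.lower, List.filter_cons]
          by_cases ha : PySem.Chars.isalpha (PySem.Chars.upperChar c) = true <;>
            simp [ha, PySem.Chars.lower]

theorem letters_contains_eq_islower (x : Char) :
    ("abcdefghijklmnopqrstuvwxyz".toList).contains x = PySem.Chars.islower x := by
  have h : "abcdefghijklmnopqrstuvwxyz".toList
      = ['a','b','c','d','e','f','g','h','i','j','k','l','m','n','o','p','q','r','s','t','u','v','w','x','y','z'] := rfl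
  rw [h, Bool.eq_iff_iff]
  simp only [List.contains_cons, List.contains_nil, PySem.Chars.islower, Char.le_def,
    UInt32.le_iff_toNat_le, beq_iff_eq, Char.ext_iff, UInt32.ext_iff, Bool.or_eq_true,
    Bool.and_eq_true, decide_eq_true_eq, Bool.false_eq_true, or_false]
  norm_num
  simp only [show ('a'.toNat)=97 from rfl, show ('b'.toNat)=98 from rfl, show ('c'.toNat)=99 from rfl, show ('d'.toNat)=100 from rfl, show ('e'.toNat)=101 from rfl, show ('f'.toNat)=102 from rfl, show ('g'.toNat)=103 from rfl, show ('h'.toNat)=104 from rfl, show ('i'.toNat)=105 from rfl, show ('j'.toNat)=106 from rfl, show ('k'.toNat)=107 from rfl, show ('l'.toNat)=108 from rfl, show ('m'.toNat)=109 from rfl, show ('n'.toNat)=110 from rfl, show ('o'.toNat)=111 from rfl, show ('p'.toNat)=112 from rfl, show ('q'.toNat)=113 from rfl, show ('r'.toNat)=114 from rfl, show ('s'.toNat)=115 from rfl, show ('t'.toNat)=116 from rfl, show ('u'.toNat)=117 from rfl, show ('v'.toNat)=118 from rfl, show ('w'.toNat)=119 from rfl, show ('x'.toNat)=120 from rfl,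 show ('y'.toNat)=121 from rfl, show ('z'.toNat)=122 from rfl]
  omega

set_option maxRecDepth 4096 in
theorem islower_lowerChar (x : Char) :
    PySem.Chars.islower (PySem.Chars.lowerChar x) = PySem.Chars.isalpha x := by
  by_cases h : PySem.Chars.isupper x = true
  · have hb : 65 ≤ x.val.toNat ∧ x.val.toNat ≤ 90 := by
      simp only [PySem.Chars.isupper, Bool.and_eq_true, decide_eq_true_eq, Char.le_def,
        UInt32.le_iff_toNat_le, show ('A'.val.toNat)=65 from rfl, show ('Z'.val.toNat)=90 from rfl] at h
      exact h
    have hv : (Char.ofNat (x.val.toNat + 32)).val.toNat = x.val.toNat + 32 := by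
      have := Char.toNat_ofNat (x.val.toNat + 32)
      simp only [Char.toNat] at this
      rw [this, if_pos]
      simp only [Nat.isValidChar]; omega
    simp only [PySem.Chars.lowerChar, PySem.Chars.isalpha, h, if_pos, Bool.true_or,
      PySem.Chars.islower, Char.le_def, UInt32.le_iff_toNat_le, Char.toNat]
    rw [Bool.eq_iff_iff]
    simp only [Bool.and_eq_true, decide_eq_true_eq, iff_true,
      show ('a'.val.toNat)=97 from rfl, show ('z'.val.toNat)=122 from rfl]
    omega
  · have h' : PySem.Chars.isupper x = false := by simpa using h
    simp [PySem.Chars.lowerChar, PySem.Chars.isalpha, h']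

theorem contains_lower_eq_isalpha (x : Char) :
    ("abcdefghijklmnopqrstuvwxyz".toList).contains (PySem.Chars.lowerChar x)
      = PySem.Chars.isalpha x := by
  rw [letters_contains_eq_islower, islower_lowerChar]

theorem filter_flatMap_cap (vs : List (List Char)) :
    (List.flatMap pvCap vs).filter PySem.Chars.isalpha = vs.flatMap pvCapF := by
  induction vs with
  | nil => simp
  | cons v vs ihv => simp [pvCapF, List.filter_append, ihv]

theorem tagLoop_filter (ws : List (List Char)) :
    (pvTagLoop 0 ws []).filter PySem.Chars.isalpha = pvS false ws := by
  cases ws with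
  | nil => simp [pvTagLoop, pvS]
  | cons w ws =>
    have h0 : pvTagLoop 0 (w :: ws) [] = PySem.Chars.lower w ++ ws.flatMap pvCap := by
      simp only [pvTagLoop]
      simpa using tagLoop_shift ws 0 (PySem.Chars.lower w)
    rw [h0]
    simp [pvS, List.filter_append, filter_flatMap_cap]

theorem core_eq (cs : List Char) :
    (pvTagLoop 0 (PySem.Chars.split₀ cs) []).filter
        (fun c => ("abcdefghijklmnopqrstuvwxyz".toList).contains (PySem.Chars.lowerChar c))
      = pvAltLoop false true cs := by
  simp only [contains_lower_eq_isalpha]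
  rw [tagLoop_filter, altLoop_split cs.length cs le_rfl false]

theorem main_eq (caption : String) : generate_tag caption = generate_tag_alt caption := by
  simp only [generate_tag, generate_tag_alt, core_eq]

-- ===== VERDICT (by name: the statement is the Claim_ definition above) =====
theorem generate_tag_spec : Claim_equal_generate_tag := by
  intro caption _hdom
  unfold Spec_generate_tag
  exact main_eq caption
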